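-- pv_equiv track=rewrite | github.com/iceprins/study-codingtest | programmers/더_맵게.py | solution
-- ===== SOURCE A (Python) =====
-- import heapq
--
-- def solution(scoville, K):
--     answer = 0
--     heapq.heapify(scoville)
--
--     while True:
--         first_val = heapq.heappop(scoville)
--
--         if first_val >= K:
--             break
--
--         if not scoville:
--             answer = -1
--             break
--
--         second_val = heapq.heappop(scoville)
--
--         new_val = first_val + second_val * 2
--         heapq.heappush(scoville, new_val)
--
--         answer += 1
--
--     return answer
-- ===== SOURCE B (Python) =====
-- def solution(scoville, K):
--     # Mutates scoville in place (sorts and pops), like A (heapify and pops).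
--     scoville.sort()
--     answer = 0
--     while True:
--         first = scoville.pop(0)
--         if first >= K:
--             break
--         if not scoville:
--             answer = -1
--             break
--         second = scoville.pop(0)
--         _insert_sorted(scoville, first + second * 2)
--         answer += 1
--     return answer
--
-- def _insert_sorted(lst, x):
--     # insert x into sorted lst, after any equal elements
--     i = 0
--     while i < len(lst) and lst[i] <= x:
--         i += 1
--     lst.insert(i, x)
-- ===== Notes on version B (the rewrite author's own statement) =====
-- stated objective: alternative
-- what changed: Replaces the binary heap (heapify/heappop/heappush) with a once-sorted list maintained by ordered insertion: pop the two front elements and re-insert the mix at its sorted position.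
import Mathlib
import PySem

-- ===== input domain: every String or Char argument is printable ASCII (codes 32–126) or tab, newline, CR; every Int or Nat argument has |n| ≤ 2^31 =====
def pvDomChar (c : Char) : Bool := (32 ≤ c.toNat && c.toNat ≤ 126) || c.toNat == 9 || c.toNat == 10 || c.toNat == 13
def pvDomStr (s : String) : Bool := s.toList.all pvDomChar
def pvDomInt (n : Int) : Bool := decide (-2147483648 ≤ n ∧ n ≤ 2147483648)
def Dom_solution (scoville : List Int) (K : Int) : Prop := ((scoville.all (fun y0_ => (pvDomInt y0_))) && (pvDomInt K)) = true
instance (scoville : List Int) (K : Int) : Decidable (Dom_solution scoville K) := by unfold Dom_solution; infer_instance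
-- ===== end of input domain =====

-- B replaces A's binary heap with a once-sorted list maintained by ordered insertion.
-- Both A and B mutate the input list in Python (heapify/sort + pops); the equivalence
-- proved here is about the RETURN value only.

-- ===== PORT A =====
-- heapq is modeled by min-extraction: heappop returns the heap's minimum value and
-- leaves the remaining elements (a permutation of them); the function's result depends
-- only on the popped values and the remaining multiset, so this is exact for the
-- return value. popMinA removes the first occurrence of the minimum.
def popMinA : List Int → Option (Int × List Int)
  | [] => none
  | [x] => some (x, [])
  | x :: y :: ys =>
    match popMinA (y :: ys) with
    | some (m, r) => if x ≤ m then some (x, y :: ys) else some (m, x :: r)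
    | none => none

theorem popMinA_length : ∀ (h : List Int) (m : Int) (r : List Int),
    popMinA h = some (m, r) → r.length + 1 = h.length := by
  intro h
  induction h with
  | nil => intro m r hp; simp [popMinA] at hp
  | cons x xs ih =>
    intro m r hp
    cases xs with
    | nil => simp [popMinA] at hp; simp [hp.2]
    | cons y ys =>
      simp only [popMinA] at hp
      cases hq : popMinA (y :: ys) with
      | none => rw [hq] at hp; simp at hp
      | some p =>
        obtain ⟨m', r'⟩ := p
        rw [hq] at hp
        by_cases hle : x ≤ m'
        · simp [hle] at hp; simp [hp.2]
        · simp [hle] at hp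
          have := ih m' r' hq
          obtain ⟨rfl, rfl⟩ := hp
          simp at this ⊢; omega

-- the loop of A: pop the minimum; if it ≥ K stop; if nothing is left answer = -1;
-- otherwise pop the next minimum, push first + second * 2, count one mix.
def solutionLoopA (h : List Int) (K : Int) (answer : Int) : Int :=
  match hp : popMinA h with
  | none => answer
  | some (first, rest) =>
    if first ≥ K then answer
    else if rest = [] then -1
    else
      match hq : popMinA rest with
      | none => answer
      | some (second, rest2) =>
        solutionLoopA ((first + second * 2) :: rest2) K (answer + 1)
termination_by h.length
decreasing_by
  have h1 := popMinA_length h first rest hp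
  have h2 := popMinA_length rest second rest2 hq
  simp; omega

def solution (scoville : List Int) (K : Int) : Int :=
  solutionLoopA scoville K 0

-- ===== PORT B =====
-- _insert_sorted: walk past elements ≤ x, insert x there (keeps the list sorted).
def insortB (x : Int) : List Int → List Int
  | [] => [x]
  | y :: ys => if y ≤ x then y :: insortB x ys else x :: y :: ys

theorem insortB_length (x : Int) : ∀ (s : List Int), (insortB x s).length = s.length + 1 := by
  intro s
  induction s with
  | nil => simp [insortB]
  | cons y ys ih => by_cases h : y ≤ x <;> simp [insortB, h, ih]

-- the loop of B over the sorted list: pop front; check ≥ K; check emptiness; pop the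
-- next front, re-insert the mix at its sorted position, count one mix.
def solutionLoopB (s : List Int) (K : Int) (answer : Int) : Int :=
  match s with
  | [] => answer
  | first :: rest =>
    if first ≥ K then answer
    else
      match rest with
      | [] => -1
      | second :: rest2 =>
        solutionLoopB (insortB (first + second * 2) rest2) K (answer + 1)
termination_by s.length
decreasing_by simp [insortB_length]

def solution_alt (scoville : List Int) (K : Int) : Int :=
  solutionLoopB (PySem.List.sorted scoville (fun x => x)) K 0

-- ===== PRECONDITION & SPEC =====
-- Pre_ excludes only the empty list, on which A's first heappop raises IndexError
-- (B's pop(0) raises there too).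
def Pre_solution (scoville : List Int) (K : Int) : Prop := scoville ≠ []
instance (scoville : List Int) (K : Int) : Decidable (Pre_solution scoville K) := by unfold Pre_solution; infer_instance
def pvWitness_solution : List Int × Int := ([1, 2, 3, 9, 10, 12], 7)

def Spec_solution (scoville : List Int) (K : Int) (out : Int) : Prop := out = solution_alt scoville K
instance (scoville : List Int) (K : Int) (out : Int) : Decidable (Spec_solution scoville K out) := by unfold Spec_solution; infer_instance

-- ===== CLAIM (what is proved, stated in full; the proofs are below) =====
def Claim_equal_solution : Prop := ∀ (scoville : List Int) (K : Int), Dom_solution scoville K → Pre_solution scoville K → Spec_solution scoville K (solution scoville K)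

-- ===== LEMMAS AND PROOFS =====

theorem popMinA_perm : ∀ (h : List Int) (m : Int) (r : List Int),
    popMinA h = some (m, r) → h.Perm (m :: r) := by
  intro h
  induction h with
  | nil => intro m r hp; simp [popMinA] at hp
  | cons x xs ih =>
    intro m r hp
    cases xs with
    | nil => simp [popMinA] at hp; obtain ⟨rfl, rfl⟩ := hp; rfl
    | cons y ys =>
      simp only [popMinA] at hp
      cases hq : popMinA (y :: ys) with
      | none => rw [hq] at hp; simp at hp
      | some p =>
        obtain ⟨m', r'⟩ := p
        rw [hq] at hp
        by_cases hle : x ≤ m'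
        · simp [hle] at hp; obtain ⟨rfl, rfl⟩ := hp; exact List.Perm.refl _
        · simp [hle] at hp
          obtain ⟨rfl, rfl⟩ := hp
          exact ((ih m' r' hq).cons x).trans (List.Perm.swap m' x r')

theorem popMinA_min : ∀ (h : List Int) (m : Int) (r : List Int),
    popMinA h = some (m, r) → ∀ y ∈ h, m ≤ y := by
  intro h
  induction h with
  | nil => intro m r hp; simp [popMinA] at hp
  | cons x xs ih =>
    intro m r hp
    cases xs with
    | nil => simp [popMinA] at hp; obtain ⟨rfl, rfl⟩ := hp; simp
    | cons y ys =>
      simp only [popMinA] at hp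
      cases hq : popMinA (y :: ys) with
      | none => rw [hq] at hp; simp at hp
      | some p =>
        obtain ⟨m', r'⟩ := p
        rw [hq] at hp
        have hmin := ih m' r' hq
        by_cases hle : x ≤ m'
        · simp [hle] at hp
          obtain ⟨rfl, rfl⟩ := hp
          intro z hz
          rcases List.mem_cons.mp hz with rfl | hz
          · exact le_refl _
          · exact le_trans hle (hmin z hz)
        · simp [hle] at hp
          obtain ⟨rfl, rfl⟩ := hp
          intro z hz
          rcases List.mem_cons.mp hz with rfl | hz
          · omega
          · exact hmin z hz

-- popping the minimum commutes with sorting: sorted h = m :: sorted r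
theorem sorted_popMinA (h : List Int) (m : Int) (r : List Int)
    (hp : popMinA h = some (m, r)) :
    PySem.List.sorted h (fun x => x) = m :: PySem.List.sorted r (fun x => x) := by
  apply PySem.List.sorted_id_eq_of_perm_of_pairwise
  · exact ((PySem.List.sorted_perm r (fun x => x) false).cons m).trans (popMinA_perm h m r hp).symm
  · refine List.pairwise_cons.mpr ⟨?_, PySem.List.sorted_pairwise r (fun x => x)⟩
    intro y hy
    have hyr : y ∈ r := ((PySem.List.sorted_perm r (fun x => x) false).mem_iff).mp hy
    have hyh : y ∈ h := (popMinA_perm h m r hp).mem_iff.mpr (List.mem_cons_of_mem m hyr)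
    exact popMinA_min h m r hp y hyh

theorem insortB_perm (x : Int) : ∀ (s : List Int), (insortB x s).Perm (x :: s) := by
  intro s
  induction s with
  | nil => simp [insortB]
  | cons y ys ih =>
    by_cases h : y ≤ x
    · simp only [insortB, if_pos h]
      exact (ih.cons y).trans (List.Perm.swap x y ys)
    · simp only [insortB, if_neg h]
      exact List.Perm.refl _

theorem insortB_pairwise (x : Int) : ∀ (s : List Int),
    s.Pairwise (· ≤ ·) → (insortB x s).Pairwise (· ≤ ·) := by
  intro s
  induction s with
  | nil => intro _; simp [insortB]
  | cons y ys ih =>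
    intro hs
    rw [List.pairwise_cons] at hs
    by_cases h : y ≤ x
    · simp only [insortB, if_pos h]
      refine List.pairwise_cons.mpr ⟨?_, ih hs.2⟩
      intro z hz
      rcases List.mem_cons.mp (((insortB_perm x ys).mem_iff).mp hz) with rfl | hz2
      · exact h
      · exact hs.1 z hz2
    · simp only [insortB, if_neg h]
      refine List.pairwise_cons.mpr ⟨?_, List.pairwise_cons.mpr hs⟩
      intro z hz
      rcases List.mem_cons.mp hz with rfl | hz
      · omega
      · exact le_trans (by omega) (hs.1 z hz)

-- ordered insertion into a sorted list is sorting the extended list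
theorem insortB_sorted (x : Int) (l : List Int) :
    insortB x (PySem.List.sorted l (fun x => x)) = PySem.List.sorted (x :: l) (fun x => x) := by
  symm
  apply PySem.List.sorted_id_eq_of_perm_of_pairwise
  · exact (insortB_perm x _).trans ((PySem.List.sorted_perm l (fun x => x) false).cons x)
  · exact insortB_pairwise x _ (PySem.List.sorted_pairwise l (fun x => x))

-- popping the minimum of a nonempty list always succeeds
theorem popMinA_ne_none : ∀ (xs : List Int) (x : Int), popMinA (x :: xs) ≠ none := by
  intro xs
  induction xs with
  | nil => intro x; simp [popMinA]
  | cons y ys ih =>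
    intro x
    simp only [popMinA]
    cases hq : popMinA (y :: ys) with
    | none => exact absurd hq (ih y)
    | some p => obtain ⟨m, r⟩ := p; by_cases hle : x ≤ m <;> simp [hle]

-- the two loops agree: B's state is always the sorted image of A's heap contents
theorem loop_eq : ∀ (n : Nat) (h : List Int) (K a : Int), h.length ≤ n →
    solutionLoopA h K a = solutionLoopB (PySem.List.sorted h (fun x => x)) K a := by
  intro n
  induction n with
  | zero =>
    intro h K a hn
    have hnil : h = [] := List.eq_nil_of_length_eq_zero (Nat.le_zero.mp hn)
    subst hnil
    simp [solutionLoopA, solutionLoopB, popMinA, PySem.List.sorted]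
  | succ n ih =>
    intro h K a hn
    rw [solutionLoopA]
    cases hp : popMinA h with
    | none =>
      have hnil : h = [] := by
        cases h with
        | nil => rfl
        | cons x xs => exact absurd hp (popMinA_ne_none xs x)
      subst hnil
      simp [solutionLoopB, PySem.List.sorted]
    | some p =>
      obtain ⟨first, rest⟩ := p
      have hs := sorted_popMinA h first rest hp
      rw [hs, solutionLoopB.eq_def]
      by_cases hK : first ≥ K
      · simp [hK]
      · by_cases hrest : rest = []
        · subst hrest
          simp [hK, PySem.List.sorted]
        · cases hq : popMinA rest with
          | none =>
            cases rest with
            | nil => exact absurd rfl hrest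
            | cons z zs => exact absurd hq (popMinA_ne_none zs z)
          | some q =>
            obtain ⟨second, rest2⟩ := q
            have hs2 := sorted_popMinA rest second rest2 hq
            have h1 := popMinA_length h first rest hp
            have h2 := popMinA_length rest second rest2 hq
            have hlen : ((first + second * 2) :: rest2).length ≤ n := by
              simp at hn ⊢; omega
            have hih := ih ((first + second * 2) :: rest2) K (a + 1) hlen
            rw [hs2]
            simp only [hK, if_false, if_neg hrest]
            split
            · rename_i heq
              rw [hq] at heq
              simp at heq
            · rename_i s2 r2 heq
              rw [hq] at heq
              simp only [Option.some.injEq, Prod.mk.injEq] at heq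
              obtain ⟨rfl, rfl⟩ := heq
              rw [insortB_sorted]
              simpa using hih

-- ===== VERDICT (by name: the statement is the Claim_ definition above) =====
theorem solution_spec : Claim_equal_solution := by
  intro scoville K _ _
  unfold Spec_solution solution solution_alt
  exact loop_eq scoville.length scoville K 0 (le_refl _)
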